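-- pv_equiv track=rewrite | github.com/avwx-rest/avwx-engine | avwx/parsing/translate/base.py | get_cardinal_direction
-- ===== SOURCE A (Python) =====
-- from typing import List, Optional, Union
--
-- def get_cardinal_direction(direction: Union[int, float]) -> str:
--     """Returns the cardinal direction (NSEW) for a degree direction
--
--     Wind Direction - Cheat Sheet:
--
--     (360) -- 011/012 -- 033/034 -- (045) -- 056/057 -- 078/079 -- (090)
--
--     (090) -- 101/102 -- 123/124 -- (135) -- 146/147 -- 168/169 -- (180)
--
--     (180) -- 191/192 -- 213/214 -- (225) -- 236/237 -- 258/259 -- (270)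
--
--     (270) -- 281/282 -- 303/304 -- (315) -- 326/327 -- 348/349 -- (360)
--     """
--     # pylint: disable=too-many-branches
--     ret = ""
--     if not isinstance(direction, int):
--         direction = int(direction)
--     # Convert to range [0 360]
--     while direction < 0:
--         direction += 360
--     direction = direction % 360
--     if 304 <= direction <= 360 or 0 <= direction <= 56:
--         ret += "N"
--         if 304 <= direction <= 348:
--             if 327 <= direction <= 348:
--                 ret += "N"
--             ret += "W"
--         elif 12 <= direction <= 56:
--             if 12 <= direction <= 33:
--                 ret += "N"
--             ret += "E"
--     elif 124 <= direction <= 236: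
--         ret += "S"
--         if 124 <= direction <= 168:
--             if 147 <= direction <= 168:
--                 ret += "S"
--             ret += "E"
--         elif 192 <= direction <= 236:
--             if 192 <= direction <= 213:
--                 ret += "S"
--             ret += "W"
--     elif 57 <= direction <= 123:
--         ret += "E"
--         if 57 <= direction <= 78:
--             ret += "NE"
--         elif 102 <= direction <= 123:
--             ret += "SE"
--     elif 237 <= direction <= 303:
--         ret += "W"
--         if 237 <= direction <= 258:
--             ret += "SW"
--         elif 282 <= direction <= 303:
--             ret += "NW"
--     return ret
-- ===== SOURCE B (Python) =====
-- COMPASS = ["N", "NNE", "NE", "ENE", "E", "ESE", "SE", "SSE",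
--            "S", "SSW", "SW", "WSW", "W", "WNW", "NW", "NNW"]
--
-- def get_cardinal_direction(direction):
--     """Returns the cardinal direction (NSEW) for a degree direction"""
--     d = int(direction) % 360
--     return COMPASS[(4 * d + 45) // 90 % 16]
-- ===== Notes on version B (the rewrite author's own statement) =====
-- stated objective: simpler
-- what changed: Replaced the normalising while-loop and the nested comparison cascade with a single arithmetic sector index ((4*d+45)//90 % 16) into a 16-entry compass table.
import Mathlib
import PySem

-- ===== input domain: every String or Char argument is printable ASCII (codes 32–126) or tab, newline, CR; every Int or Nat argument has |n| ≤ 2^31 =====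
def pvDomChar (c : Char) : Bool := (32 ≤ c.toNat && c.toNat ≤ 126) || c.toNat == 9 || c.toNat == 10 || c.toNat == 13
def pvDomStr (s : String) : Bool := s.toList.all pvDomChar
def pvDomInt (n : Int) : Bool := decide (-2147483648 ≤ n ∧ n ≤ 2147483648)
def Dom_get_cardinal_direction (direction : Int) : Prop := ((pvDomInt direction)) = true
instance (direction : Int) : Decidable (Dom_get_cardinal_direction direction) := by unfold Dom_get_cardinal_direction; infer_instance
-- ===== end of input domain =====

-- B replaces A's normalising while-loop and nested comparison cascade with one arithmetic sector index into a 16-entry compass table (objective: simpler).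



-- ===== PORT A =====
-- A: while-loop normalisation into [0, 360), then the nested comparison cascade.
-- 'while direction < 0: direction += 360' ported as structural recursion on (-direction).toNat.
def normNeg (direction : Int) : Int :=
  if h : direction < 0 then normNeg (direction + 360) else direction
termination_by (-direction).toNat
decreasing_by omega

def cascade (direction : Int) : String :=
  let ret := ""
  if (304 ≤ direction ∧ direction ≤ 360) ∨ (0 ≤ direction ∧ direction ≤ 56) then
    let ret := ret ++ "N"
    if 304 ≤ direction ∧ direction ≤ 348 then
      let ret := if 327 ≤ direction ∧ direction ≤ 348 then ret ++ "N" else ret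
      ret ++ "W"
    else if 12 ≤ direction ∧ direction ≤ 56 then
      let ret := if 12 ≤ direction ∧ direction ≤ 33 then ret ++ "N" else ret
      ret ++ "E"
    else ret
  else if 124 ≤ direction ∧ direction ≤ 236 then
    let ret := ret ++ "S"
    if 124 ≤ direction ∧ direction ≤ 168 then
      let ret := if 147 ≤ direction ∧ direction ≤ 168 then ret ++ "S" else ret
      ret ++ "E"
    else if 192 ≤ direction ∧ direction ≤ 236 then
      let ret := if 192 ≤ direction ∧ direction ≤ 213 then ret ++ "S" else ret
      ret ++ "W"
    else ret
  else if 57 ≤ direction ∧ direction ≤ 123 then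
    let ret := ret ++ "E"
    if 57 ≤ direction ∧ direction ≤ 78 then ret ++ "NE"
    else if 102 ≤ direction ∧ direction ≤ 123 then ret ++ "SE"
    else ret
  else if 237 ≤ direction ∧ direction ≤ 303 then
    let ret := ret ++ "W"
    if 237 ≤ direction ∧ direction ≤ 258 then ret ++ "SW"
    else if 282 ≤ direction ∧ direction ≤ 303 then ret ++ "NW"
    else ret
  else ret

def get_cardinal_direction (direction : Int) : String :=
  cascade (PySem.Int.mod (normNeg direction) 360)

-- ===== PORT B =====
-- B: single arithmetic sector index into a 16-entry compass table.
def COMPASS : List String :=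
  ["N", "NNE", "NE", "ENE", "E", "ESE", "SE", "SSE",
   "S", "SSW", "SW", "WSW", "W", "WNW", "NW", "NNW"]

-- the index (4*d+45)//90 % 16 is always in [0, 16), so .getD "" is exact (never the default)
def get_cardinal_direction_alt (direction : Int) : String :=
  let d := PySem.Int.mod direction 360
  (PySem.List.pyGet? COMPASS (PySem.Int.mod (PySem.Int.floordiv (4 * d + 45) 90) 16)).getD ""

-- ===== PRECONDITION & SPEC =====
def Spec_get_cardinal_direction (direction : Int) (out : String) : Prop := out = get_cardinal_direction_alt direction
instance (direction : Int) (out : String) : Decidable (Spec_get_cardinal_direction direction out) := by unfold Spec_get_cardinal_direction; infer_instance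

-- ===== CLAIM (what is proved, stated in full; the proofs are below) =====
def Claim_equal_get_cardinal_direction : Prop := ∀ (direction : Int), Dom_get_cardinal_direction direction → Spec_get_cardinal_direction direction (get_cardinal_direction direction)

-- ===== LEMMAS AND PROOFS =====

lemma normNeg_mod (direction : Int) :
    PySem.Int.mod (normNeg direction) 360 = PySem.Int.mod direction 360 := by
  unfold normNeg
  split
  · rw [normNeg_mod (direction + 360)]
    simp [PySem.Int.mod, Int.add_fmod_right]
  · rfl
termination_by (-direction).toNat
decreasing_by omega

set_option maxRecDepth 100000 in
lemma core : ∀ n : Nat, n < 360 →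
    cascade ((n : Int)) =
      (PySem.List.pyGet? COMPASS
        (PySem.Int.mod (PySem.Int.floordiv (4 * (n : Int) + 45) 90) 16)).getD "" := by
  decide

-- ===== VERDICT (by name: the statement is the Claim_ definition above) =====
theorem get_cardinal_direction_spec : Claim_equal_get_cardinal_direction := by
  intro direction _
  unfold Spec_get_cardinal_direction get_cardinal_direction get_cardinal_direction_alt
  rw [normNeg_mod]
  have h0 : 0 ≤ PySem.Int.mod direction 360 := Int.fmod_nonneg_of_pos direction (by norm_num)
  have h1 : PySem.Int.mod direction 360 < 360 := Int.fmod_lt_of_pos direction (by norm_num)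
  have hc := core (PySem.Int.mod direction 360).toNat (by omega)
  rw [Int.toNat_of_nonneg h0] at hc
  exact hc
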